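-- pv_equiv track=rewrite | github.com/blzzua/codewars | 6-kyu/message_validator.py | is_a_valid_message
-- ===== SOURCE A (Python) =====
-- def is_a_valid_message(message):
--     size = 0
--     count = 0
--     for c in message:
--         if c.isnumeric():
--             if count == 0:
--                 size = size * 10 + int(c)
--             else:
--                 if count != size:
--                     return False
--                 count = 0
--                 size = int(c)
--         else:
--             count = count + 1
--     return count == size
-- ===== SOURCE B (Python) =====
-- def is_a_valid_message(message):
--     i = 0
--     n = len(message)
--     while i < n:
--         if not message[i].isnumeric():
--             return False
--         num = 0
--         while i < n and message[i].isnumeric():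
--             num = num * 10 + int(message[i])
--             i += 1
--         counted = 0
--         while i < n and counted < num and not message[i].isnumeric():
--             counted += 1
--             i += 1
--         if counted != num:
--             return False
--     return True
-- ===== Notes on version B (the rewrite author's own statement) =====
-- stated objective: alternative
-- what changed: A's single flat scan with a two-variable (size,count) state machine is replaced by a nested index-based parser: an outer while loop per chunk with one inner loop reading the digit prefix into num and another consuming up to num non-digit characters; B returns False as soon as a chunk fails instead of scanning to the string's end as A does on inputs with no further digits.
import Mathlib
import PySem

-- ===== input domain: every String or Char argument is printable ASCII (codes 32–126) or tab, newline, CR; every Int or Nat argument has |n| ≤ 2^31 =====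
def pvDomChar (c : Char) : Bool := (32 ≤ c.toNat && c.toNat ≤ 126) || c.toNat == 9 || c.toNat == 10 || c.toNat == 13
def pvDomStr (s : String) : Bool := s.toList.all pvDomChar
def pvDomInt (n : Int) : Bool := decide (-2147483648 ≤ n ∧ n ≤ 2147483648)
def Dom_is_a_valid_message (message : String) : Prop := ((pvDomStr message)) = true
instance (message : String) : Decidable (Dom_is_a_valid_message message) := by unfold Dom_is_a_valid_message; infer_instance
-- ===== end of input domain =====

-- B replaces A's flat one-variable state machine by a nested chunk parser (read a length, then
-- consume up to that many non-digit characters, repeat); objective: alternative decomposition.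
-- On the printable-ASCII domain str.isnumeric() coincides with Char isdigit, and int(c) on a
-- digit character is c.toNat - 48; the ports use these, exact on Dom.

-- ===== PORT A =====
-- A's for-loop over state (size, count), with early return False
def aLoop : List Char → Int → Int → Bool
  | [], size, count => decide (count = size)
  | c :: rest, size, count =>
    if PySem.Chars.isdigit c then
      if count = 0 then
        aLoop rest (size * 10 + Int.ofNat (c.toNat - 48)) count
      else
        if count ≠ size then false
        else aLoop rest (Int.ofNat (c.toNat - 48)) 0
    else aLoop rest size (count + 1)

def is_a_valid_message (message : String) : Bool := aLoop message.toList 0 0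

-- ===== PORT B =====
-- inner loop 1 of B: read all consecutive digit characters, accumulating num
def readDigits : List Char → Int → Int × List Char
  | [], num => (num, [])
  | c :: rest, num =>
    if PySem.Chars.isdigit c then readDigits rest (num * 10 + Int.ofNat (c.toNat - 48))
    else (num, c :: rest)

-- inner loop 2 of B: consume non-digit characters, counting, up to num of them
def consume : List Char → Int → Int → Int × List Char
  | [], counted, _ => (counted, [])
  | c :: rest, counted, num =>
    if counted < num ∧ ¬ PySem.Chars.isdigit c then consume rest (counted + 1) num
    else (counted, c :: rest)

theorem readDigits_len : ∀ (l : List Char) (n : Int), (readDigits l n).2.length ≤ l.length := by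
  intro l
  induction l with
  | nil => intro n; simp [readDigits]
  | cons c rest ih =>
    intro n
    simp only [readDigits]
    split
    · exact Nat.le_trans (ih _) (Nat.le_succ _)
    · simp

theorem consume_len : ∀ (l : List Char) (k n : Int), (consume l k n).2.length ≤ l.length := by
  intro l
  induction l with
  | nil => intro k n; simp [consume]
  | cons c rest ih =>
    intro k n
    simp only [consume]
    split
    · exact Nat.le_trans (ih _ _) (Nat.le_succ _)
    · simp

-- outer while loop of B: one iteration per chunk
def bParse : List Char → Bool
  | [] => true
  | c :: rest =>
    if PySem.Chars.isdigit c then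
      let p := readDigits rest (Int.ofNat (c.toNat - 48))
      let q := consume p.2 0 p.1
      if q.1 ≠ p.1 then false else bParse q.2
    else false
termination_by l => l.length
decreasing_by
  exact Nat.lt_succ_of_le (Nat.le_trans (consume_len _ _ _) (readDigits_len _ _))

def is_a_valid_message_alt (message : String) : Bool := bParse message.toList

-- ===== PRECONDITION & SPEC =====
def Spec_is_a_valid_message (message : String) (out : Bool) : Prop := out = is_a_valid_message_alt message
instance (message : String) (out : Bool) : Decidable (Spec_is_a_valid_message message out) := by unfold Spec_is_a_valid_message; infer_instance

-- ===== CLAIM (what is proved, stated in full; the proofs are below) =====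
def Claim_equal_is_a_valid_message : Prop := ∀ (message : String), Dom_is_a_valid_message message → Spec_is_a_valid_message message (is_a_valid_message message)

-- ===== LEMMAS AND PROOFS =====

-- proof-side views of B's suffix states: mid-digit-chunk and mid-count-chunk
def bCont (l : List Char) (size : Int) : Bool :=
  let p := readDigits l size
  let q := consume p.2 0 p.1
  if q.1 ≠ p.1 then false else bParse q.2

def bCons (l : List Char) (count size : Int) : Bool :=
  let q := consume l count size
  if q.1 ≠ size then false else bParse q.2

-- once count exceeds size, A can only return False
theorem aLoop_false : ∀ (l : List Char) (size count : Int),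
    0 ≤ size → size < count → aLoop l size count = false := by
  intro l
  induction l with
  | nil =>
    intro size count h0 h1
    simp only [aLoop, decide_eq_false_iff_not]
    omega
  | cons c rest ih =>
    intro size count h0 h1
    simp only [aLoop]
    split
    · rw [if_neg (by omega : ¬ count = 0), if_pos (by omega : count ≠ size)]
    · exact ih size (count + 1) h0 (by omega)

theorem main_inv : ∀ (n : ℕ) (l : List Char), l.length ≤ n →
    (∀ size : Int, 0 ≤ size → aLoop l size 0 = bCont l size) ∧
    (∀ size count : Int, 0 < count → count ≤ size → aLoop l size count = bCons l count size) := by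
  intro n
  induction n with
  | zero =>
    intro l hl
    have : l = [] := List.eq_nil_of_length_eq_zero (Nat.le_zero.mp hl)
    subst this
    refine ⟨?_, ?_⟩
    · intro size h0
      simp only [aLoop, bCont, readDigits, consume, bParse]
      by_cases h : size = 0
      · subst h; simp
      · rw [if_pos (by omega : (0:Int) ≠ size)]
        simp; omega
    · intro size count h1 h2
      simp only [aLoop, bCons, consume]
      by_cases h : count = size
      · subst h; simp [bParse]
      · rw [if_pos h]
        simp [h]
  | succ m ih =>
    intro l hl
    match l with
    | [] => exact ih [] (by simp)
    | c :: rest =>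
      have hrest : rest.length ≤ m := Nat.lt_succ_iff.mp (Nat.lt_of_lt_of_le (by simp) hl)
      refine ⟨?_, ?_⟩
      · -- digit-reading phase: count = 0
        intro size h0
        by_cases hd : PySem.Chars.isdigit c = true
        · have hnew : 0 ≤ size * 10 + Int.ofNat (c.toNat - 48) := by
            have : (0:Int) ≤ Int.ofNat (c.toNat - 48) := Int.natCast_nonneg _
            nlinarith
          have hih := (ih rest hrest).1 (size * 10 + Int.ofNat (c.toNat - 48)) hnew
          simp only [aLoop, hd, if_true]
          rw [hih]
          simp only [bCont, readDigits, hd, if_true]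
        · simp only [aLoop, hd, Bool.false_eq_true, if_false]
          simp only [bCont, readDigits, hd, Bool.false_eq_true, if_false]
          by_cases hs : size = 0
          · subst hs
            simp only [consume]
            rw [if_neg (by omega : ¬ ((0:Int) < 0 ∧ ¬ PySem.Chars.isdigit c = true))]
            rw [if_neg (by simp : ¬ ((0:Int), c :: rest).1 ≠ 0)]
            simp only [bParse, hd, Bool.false_eq_true, if_false]
            exact aLoop_false rest 0 1 (by omega) (by omega)
          · have hpos : (0:Int) < size := lt_of_le_of_ne h0 (Ne.symm hs)
            simp only [consume]
            rw [if_pos (⟨hpos, by simp [hd]⟩ : (0:Int) < size ∧ ¬ PySem.Chars.isdigit c = true)]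
            have hih := (ih rest hrest).2 size 1 (by omega) (by omega)
            simp only [zero_add]
            rw [hih]
            simp only [bCons]
      · -- non-digit-counting phase: 0 < count ≤ size
        intro size count h1 h2
        by_cases hd : PySem.Chars.isdigit c = true
        · simp only [aLoop, hd, if_true, if_neg (by omega : ¬ count = 0)]
          by_cases he : count = size
          · subst he
            rw [if_neg (by omega : ¬ count ≠ count)]
            simp only [bCons, consume]
            rw [if_neg (by omega : ¬ (count < count ∧ ¬ PySem.Chars.isdigit c = true))]
            rw [if_neg (by simp : ¬ (count, c :: rest).1 ≠ count)]
            simp only [bParse, hd, if_true]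
            have hih := (ih rest hrest).1 (Int.ofNat (c.toNat - 48)) (Int.natCast_nonneg _)
            rw [hih]
            simp only [bCont]
          · rw [if_pos he]
            simp only [bCons, consume]
            rw [if_neg (by simp [hd] : ¬ (count < size ∧ ¬ PySem.Chars.isdigit c = true))]
            rw [if_pos (by simpa using he : ((count, c :: rest).1 ≠ size))]
        · simp only [aLoop, hd, Bool.false_eq_true, if_false]
          by_cases he : count = size
          · subst he
            simp only [bCons, consume]
            rw [if_neg (by omega : ¬ (count < count ∧ ¬ PySem.Chars.isdigit c = true))]
            rw [if_neg (by simp : ¬ (count, c :: rest).1 ≠ count)]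
            simp only [bParse, hd, Bool.false_eq_true, if_false]
            exact aLoop_false rest count (count + 1) (by omega) (by omega)
          · have hlt : count < size := lt_of_le_of_ne h2 he
            simp only [bCons, consume]
            rw [if_pos (⟨hlt, by simp [hd]⟩ : count < size ∧ ¬ PySem.Chars.isdigit c = true)]
            have hih := (ih rest hrest).2 size (count + 1) (by omega) (by omega)
            rw [hih]
            simp only [bCons]

theorem consume_self : ∀ (l : List Char) (k : Int), consume l k k = (k, l) := by
  intro l k
  cases l with
  | nil => simp [consume]
  | cons c rest => simp only [consume]; rw [if_neg (by omega)]

theorem bCont_zero (l : List Char) : bCont l 0 = bParse l := by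
  match l with
  | [] => simp [bCont, readDigits, consume, bParse]
  | c :: rest =>
    by_cases hd : PySem.Chars.isdigit c = true
    · simp only [bCont, readDigits, hd, if_true, bParse]
      norm_num
    · simp only [bCont, readDigits, hd, Bool.false_eq_true, if_false, consume_self]
      simp

-- ===== VERDICT (by name: the statement is the Claim_ definition above) =====
theorem is_a_valid_message_spec : Claim_equal_is_a_valid_message := by
  intro message _
  unfold Spec_is_a_valid_message is_a_valid_message is_a_valid_message_alt
  rw [(main_inv message.toList.length message.toList le_rfl).1 0 le_rfl, bCont_zero]
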